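-- pv_equiv track=rewrite | github.com/cmbenello/141-discussion | problems/expressions.py | cl63_select_columns
-- ===== SOURCE A (Python) =====
-- def cl63_select_columns(table: list[list], cols: list[str]) -> list[list]:
--     """Midterm-style
--     Problem: Produce a new table with only the given columns, in the given order. Row 0 of the result
--     should be the column names; subsequent rows carry extracted values.
--     Inputs: table (list-of-lists, well-formed), cols (list[str] subset of headers)
--     Output: new list-of-lists table (do not mutate input table).
--     """
--     headers = table[0]
--     indices = [headers.index(c) for c in cols]
--     result = [cols[:]]  # copy of cols as header
--     for row in table[1:]:
--         new_row = [row[i] for i in indices]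
--         result.append(new_row)
--     return result
-- ===== SOURCE B (Python) =====
-- def cl63_select_columns(table: list[list], cols: list[str]) -> list[list]:
--     # Column-major: extract each requested column whole (header cell included), then transpose.
--     if not cols:
--         return [[] for _ in table]
--     headers = table[0]
--     indices = [headers.index(c) for c in cols]
--     columns = [[row[i] for row in table] for i in indices]
--     return list(map(list, zip(*columns)))
-- ===== Notes on version B (the rewrite author's own statement) =====
-- stated objective: alternative
-- what changed: B builds the result column-major (precomputes the column indices, extracts each requested column whole with its header cell, then transposes with zip) instead of A's row-major loop appending one projected row per data row.
import Mathlib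
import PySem

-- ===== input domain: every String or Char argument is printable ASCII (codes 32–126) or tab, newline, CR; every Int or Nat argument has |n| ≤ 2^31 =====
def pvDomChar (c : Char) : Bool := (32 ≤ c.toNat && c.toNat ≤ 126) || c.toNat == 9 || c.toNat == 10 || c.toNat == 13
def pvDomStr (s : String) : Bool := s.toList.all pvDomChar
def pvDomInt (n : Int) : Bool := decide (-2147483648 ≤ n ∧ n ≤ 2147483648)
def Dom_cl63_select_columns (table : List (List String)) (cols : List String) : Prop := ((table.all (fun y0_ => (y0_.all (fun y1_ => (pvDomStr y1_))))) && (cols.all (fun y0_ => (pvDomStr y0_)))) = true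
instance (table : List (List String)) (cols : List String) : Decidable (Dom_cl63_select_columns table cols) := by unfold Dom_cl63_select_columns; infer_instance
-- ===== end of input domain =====

-- B builds the result column-major (one whole column per requested name, then a transpose) instead of
-- A's row-major projection loop; equal cost, different decomposition ("alternative").

-- ===== PORT A =====
def cl63_select_columns (table : List (List String)) (cols : List String) : List (List String) :=
  let headers := (PySem.List.pyGet? table 0).getD []        -- table[0]; none (IndexError) excluded by Pre_
  let indices := cols.map (fun c => (PySem.List.index? headers c).getD 0)  -- headers.index(c); ValueError excluded by Pre_
  let result := [cols]
  (PySem.List.slice table (some 1) none).foldl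
    (fun result row =>
      result ++ [indices.map (fun i : Nat => (PySem.List.pyGet? row (i : Int)).getD "")])  -- row[i]; IndexError excluded by Pre_
    result

-- ===== PORT B =====
-- the tails are never longer in total, and strictly shorter when all lists are nonempty
-- (termination of pyZipStar)
theorem pvTails_sum_le (t : List (List String)) :
    ((t.map List.tail).map List.length).sum ≤ (t.map List.length).sum := by
  induction t with
  | nil => simp
  | cons b bs ih =>
    simp only [List.map_cons, List.sum_cons]
    have hb : b.tail.length = b.length - 1 := List.length_tail
    omega

theorem pvZip_tails_lt (ls : List (List String)) (hne : ls ≠ [])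
    (h : ∀ l ∈ ls, l ≠ []) :
    ((ls.map List.tail).map List.length).sum < (ls.map List.length).sum := by
  match ls with
  | [] => exact absurd rfl hne
  | l :: t =>
    have hl : l ≠ [] := h l (List.mem_cons_self ..)
    have h1 : l.tail.length = l.length - 1 := List.length_tail
    have h0 : 0 < l.length := List.length_pos_of_ne_nil hl
    have h2 := pvTails_sum_le t
    simp only [List.map_cons, List.sum_cons]
    omega

-- mapM head? succeeding means no list in ls is empty
theorem pvNil_not_mem (ls : List (List String)) :
    ∀ heads, List.mapM List.head? ls = some heads → ([] : List String) ∉ ls := by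
  induction ls with
  | nil => simp
  | cons a t ih =>
    intro heads h
    rw [List.mapM_cons] at h
    cases ha : a.head? with
    | none => simp [ha] at h
    | some v =>
      cases ht : t.mapM List.head? with
      | none => simp [ha, ht] at h
      | some hs =>
        simp only [List.mem_cons, not_or]
        exact ⟨fun he => by subst he; simp at ha, ih hs ht⟩

-- hand port of Python's variadic zip(*ls) (PySem has only binary List.zip): take heads while
-- every list is nonempty; exact for any ls, including ragged ones (stops at the shortest list)
def pyZipStar (ls : List (List String)) : List (List String) :=
  if hne : ls = [] then []
  else
    match h : ls.mapM List.head? with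
    | none => []
    | some heads => heads :: pyZipStar (ls.map List.tail)
termination_by (ls.map List.length).sum
decreasing_by
  simp only [List.map_subtype, List.unattach_attach]
  exact pvZip_tails_lt ls hne (fun l hl hn => pvNil_not_mem ls heads h (hn ▸ hl))

def cl63_select_columns_alt (table : List (List String)) (cols : List String) : List (List String) :=
  if cols = [] then table.map (fun _ => ([] : List String))
  else
    let headers := (PySem.List.pyGet? table 0).getD []
    let indices := cols.map (fun c => (PySem.List.index? headers c).getD 0)
    let columns := indices.map (fun i : Nat => table.map (fun row => (PySem.List.pyGet? row (i : Int)).getD ""))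
    pyZipStar columns  -- list(map(list, zip(*columns))): pyZipStar already yields lists

-- ===== PRECONDITION & SPEC =====
-- Pre_ excludes exactly the inputs where A raises: empty table (IndexError on table[0]),
-- a requested column absent from the headers (ValueError), or a data row too short for a
-- selected index (IndexError).
def Pre_cl63_select_columns (table : List (List String)) (cols : List String) : Prop :=
  table ≠ [] ∧ ∀ c ∈ cols, c ∈ table.headD [] ∧
    ∀ row ∈ table.tail, (PySem.List.index? (table.headD []) c).getD 0 < row.length
instance (table : List (List String)) (cols : List String) : Decidable (Pre_cl63_select_columns table cols) := by unfold Pre_cl63_select_columns; infer_instance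

def pvWitness_cl63_select_columns : List (List String) × List String :=
  ([["id", "name"], ["1", "ann"], ["2", "bob"]], ["name", "id"])

def Spec_cl63_select_columns (table : List (List String)) (cols : List String) (out : List (List String)) : Prop := out = cl63_select_columns_alt table cols
instance (table : List (List String)) (cols : List String) (out : List (List String)) : Decidable (Spec_cl63_select_columns table cols out) := by unfold Spec_cl63_select_columns; infer_instance

-- ===== CLAIM (what is proved, stated in full; the proofs are below) =====
def Claim_equal_cl63_select_columns : Prop := ∀ (table : List (List String)) (cols : List String), Dom_cl63_select_columns table cols → Pre_cl63_select_columns table cols → Spec_cl63_select_columns table cols (cl63_select_columns table cols)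

-- ===== LEMMAS AND PROOFS =====

-- mapM head? over a list of manifest cons-cells yields the heads
theorem pvMapM_head?_cons (cols : List String) (x : String → String) (y : String → List String) :
    (cols.map (fun c => x c :: y c)).mapM List.head? = some (cols.map x) := by
  induction cols with
  | nil => rfl
  | cons c cs ih => simp [ih]

-- zipStar of a rectangular column-major family is the row-major family
theorem pvZipStar_rect (cols : List String) (hcols : cols ≠ [])
    (f : String → List String → String) (rows : List (List String)) :
    pyZipStar (cols.map (fun c => rows.map (f c))) =
      rows.map (fun row => cols.map (fun c => f c row)) := by
  induction rows with
  | nil =>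
    obtain ⟨c, cs, rfl⟩ := List.exists_cons_of_ne_nil hcols
    rw [pyZipStar.eq_def]
    split
    · rfl
    · split
      · rfl
      · next heads h => exact absurd (pvNil_not_mem _ heads h) (by simp)
  | cons r rs ih =>
    rw [pyZipStar.eq_def]
    have hne : cols.map (fun c => (r :: rs).map (f c)) ≠ [] := by
      simp [hcols]
    rw [dif_neg hne]
    have hm := pvMapM_head?_cons cols (fun c => f c r) (fun c => rs.map (f c))
    simp only [List.map_cons] at *
    rw [hm]
    have ht : (cols.map fun c => f c r :: rs.map (f c)).map List.tail
         = cols.map (fun c => rs.map (f c)) := by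
      simp [List.map_map, Function.comp]
    rw [ht, ih]

-- ===== VERDICT (by name: the statement is the Claim_ definition above) =====
theorem cl63_select_columns_spec : Claim_equal_cl63_select_columns := by
  intro table cols _ hPre
  obtain ⟨hne, hcols⟩ := hPre
  obtain ⟨headers, rest, rfl⟩ := List.exists_cons_of_ne_nil hne
  unfold Spec_cl63_select_columns cl63_select_columns cl63_select_columns_alt
  simp only [PySem.List.pyGet?_zero_cons, Option.getD_some, PySem.List.slice_from_one,
    List.tail_cons, PySem.List.foldl_append_singleton_eq_map, List.singleton_append]
  by_cases hc : cols = []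
  · subst hc; simp
  · rw [if_neg hc]
    rw [List.map_map]
    simp only [Function.comp_def]
    rw [pvZipStar_rect cols hc
      (fun c row => (PySem.List.pyGet? row (((PySem.List.index? headers c).getD 0 : Nat) : Int)).getD "")
      (headers :: rest)]
    simp only [List.map_cons]
    congr 1
    · -- header row of B is cols itself
      have hs : ∀ c ∈ cols,
          (PySem.List.pyGet? headers (((PySem.List.index? headers c).getD 0 : Nat) : Int)).getD "" = c := by
        intro c hcmem
        obtain ⟨hmem, -⟩ := hcols c hcmem
        have hmem' : c ∈ headers := by simpa using hmem
        have hsome : (PySem.List.index? headers c).isSome :=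
          (PySem.List.index?_isSome_iff headers c).mpr hmem'
        obtain ⟨k, hk⟩ := Option.isSome_iff_exists.mp hsome
        obtain ⟨hklt, hget, -⟩ := PySem.List.getElem_of_index?_eq_some hk
        rw [hk]
        simp [PySem.List.pyGet?_natCast, List.getElem?_eq_getElem hklt, hget]
      rw [List.map_congr_left (g := id) hs, List.map_id]
    · -- data rows: indices.map ∘ get = cols.map ∘ (get ∘ idx)
      refine List.map_congr_left (fun row _ => ?_)
      rw [List.map_map]
      rfl
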